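-- pv_equiv track=rewrite | github.com/nehuengonzalez/survivability | survivability/preproc/compute.py | compute_ks
-- ===== SOURCE A (Python) =====
-- def compute_ks(scenarios, demands):
--     """
--     Este metodo construye la lista de demandas a rutear por escenario.
--     Args:
--         scenarios: Es una lista de escenarios de corte. Donde cada elemento
--                    de la lista (escenario) es una lista con los inidices de
--                    arco, e_ids, de aquellos arcos que están cortados. La
--                    posición en la lista representa el número de escenario.
--
--         demands: Es una lista de demandas. Cada demanda es una tupla de dos
--                  elementos, donde el primero es la capacidad demandada y el
--                  segundo es una lista de caminos. Estos caminos representan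
--                  a los caminos de working y protección dedicada del servicio.
--                  [(3,[[0],[2,1]]),(2,[[23],[21,13],[45,20]]),(4,[[43]]),
--                     ...,(cap,[epath0,epath1])]
--     Returns:
--             Ks: Es una lista que contiene las demandas que deben ser ruteadas en
--             cada escenario. Es decir, cada elemento de Ks es una lista con los
--             indices de aquellas demandas que fueron afectadas por el escenario
--             que corresponde con la posición de la lista en Ks y que deben
--             ser restauradas.
--
--     """
--     # Genero la lista de demandas que deberían ser ruteadas
--     ks = []
--     for g, g_list in enumerate(scenarios):
--         kg = []
--         for k, dem in enumerate(demands):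
--             cuts = 0
--             for p_id, p in enumerate(dem[1]):
--                 for e_id in g_list:
--                     if e_id in p:
--                         cuts += 1
--                         break
--             if cuts == len(dem[1]):
--                 kg.append(k)
--         ks.append(kg)
--     return ks
-- ===== SOURCE B (Python) =====
-- def compute_ks(scenarios, demands):
--     # Inverted index edge -> (demand, path) pairs whose path contains that edge,
--     # built once; each scenario unions the hit pairs of its cut edges and keeps
--     # the demands whose number of distinct hit paths reaches their path count.
--     hits_of_edge = {}
--     for k, (_cap, paths) in enumerate(demands):
--         for p_id, p in enumerate(paths):
--             for e in p:
--                 hits_of_edge.setdefault(e, []).append((k, p_id))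
--     n_paths = [len(d[1]) for d in demands]
--     ks = []
--     for g_list in scenarios:
--         hit = set()
--         for e in g_list:
--             hit.update(hits_of_edge.get(e, ()))
--         cut_count = [0] * len(demands)
--         for pair in hit:
--             cut_count[pair[0]] += 1
--         ks.append([k for k in range(len(demands)) if cut_count[k] == n_paths[k]])
--     return ks
-- ===== Notes on version B (the rewrite author's own statement) =====
-- stated objective: faster
-- what changed: Replaces A's per-scenario membership tests of every cut edge against every path by an inverted edge->(demand,path) index built once over the demands; each scenario then only unions the index entries of its cut edges and counts distinct hit paths per demand.
import Mathlib
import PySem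

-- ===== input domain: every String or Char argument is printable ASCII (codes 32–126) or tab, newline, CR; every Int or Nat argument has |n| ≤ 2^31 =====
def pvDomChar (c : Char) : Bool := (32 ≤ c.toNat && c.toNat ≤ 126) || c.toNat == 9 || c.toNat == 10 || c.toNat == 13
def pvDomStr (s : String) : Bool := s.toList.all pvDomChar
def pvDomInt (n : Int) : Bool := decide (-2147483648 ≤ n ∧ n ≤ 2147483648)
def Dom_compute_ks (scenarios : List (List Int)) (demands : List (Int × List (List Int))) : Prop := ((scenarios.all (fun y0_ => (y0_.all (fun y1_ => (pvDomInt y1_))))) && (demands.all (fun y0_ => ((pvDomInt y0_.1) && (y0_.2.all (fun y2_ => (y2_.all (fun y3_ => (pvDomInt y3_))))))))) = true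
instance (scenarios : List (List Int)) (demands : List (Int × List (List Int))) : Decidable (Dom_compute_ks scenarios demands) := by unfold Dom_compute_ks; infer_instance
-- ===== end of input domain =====

-- B replaces A's per-scenario per-demand per-path membership scans by an inverted
-- edge->(demand,path) index built once; objective: faster (the per-scenario work no
-- longer touches every path of every demand).


-- ===== PORT A =====
def compute_ks (scenarios : List (List Int)) (demands : List (Int × List (List Int))) : List (List Int) :=
  scenarios.foldl (fun ks g_list =>
    let kg := (PySem.List.enumerate demands 0).foldl (fun kg kdem =>
      let dem := kdem.2
      -- inner 'for e_id in g_list: if e_id in p: cuts += 1; break' is List.any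
      let cuts : Int := (PySem.List.enumerate dem.2 0).foldl (fun cuts pp =>
        if g_list.any (fun e_id => decide (e_id ∈ pp.2)) then cuts + 1 else cuts) 0
      if cuts = (dem.2.length : Int) then kg ++ [kdem.1] else kg) []
    ks ++ [kg]) []

-- ===== PORT B =====
-- hits_of_edge: inverted index, edge -> list of (demand id, path id) of the paths containing it
def bIndex (demands : List (Int × List (List Int))) : PySem.Dict Int (List (Int × Int)) :=
  (PySem.List.enumerate demands 0).foldl (fun d kd =>
    (PySem.List.enumerate kd.2.2 0).foldl (fun d pp =>
      -- hits_of_edge.setdefault(e, []).append((k, p_id))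
      pp.2.foldl (fun d e => d.modify e [] (· ++ [(kd.1, pp.1)])) d) d) PySem.Dict.empty

-- one scenario: union the index entries of the cut edges, count distinct hit paths per demand
def bRowOf (index : PySem.Dict Int (List (Int × Int))) (nPaths : List Int) (nDem : Nat) (g_list : List Int) : List Int :=
  let hit : PySem.Set (Int × Int) := g_list.foldl (fun h e => PySem.Set.update h (index.getD e [])) PySem.Set.empty
  -- cut_count[pair[0]] += 1 ; indices from enumerate are always in range, pySetD is exact there
  let cnt := hit.foldl (fun c p => PySem.List.pySetD c p.1 (PySem.List.pyGetD c p.1 0 + 1)) (List.replicate nDem (0 : Int))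
  (PySem.List.pyRange 0 (nDem : Int) 1).filter (fun k => PySem.List.pyGetD cnt k 0 == PySem.List.pyGetD nPaths k 0)

def compute_ks_alt (scenarios : List (List Int)) (demands : List (Int × List (List Int))) : List (List Int) :=
  let index := bIndex demands
  let nPaths := demands.map (fun d => (d.2.length : Int))
  scenarios.foldl (fun ks g_list => ks ++ [bRowOf index nPaths demands.length g_list]) []

-- ===== PRECONDITION & SPEC =====
def Spec_compute_ks (scenarios : List (List Int)) (demands : List (Int × List (List Int))) (out : List (List Int)) : Prop := out = compute_ks_alt scenarios demands
instance (scenarios : List (List Int)) (demands : List (Int × List (List Int))) (out : List (List Int)) : Decidable (Spec_compute_ks scenarios demands out) := by unfold Spec_compute_ks; infer_instance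

-- ===== CLAIM (what is proved, stated in full; the proofs are below) =====
def Claim_equal_compute_ks : Prop := ∀ (scenarios : List (List Int)) (demands : List (Int × List (List Int))), Dom_compute_ks scenarios demands → Spec_compute_ks scenarios demands (compute_ks scenarios demands)

-- ===== LEMMAS AND PROOFS =====

-- the predicate both programs decide: every path of the demand meets the cut list
def fullyCut (g_list : List Int) (paths : List (List Int)) : Bool :=
  paths.all (fun p => g_list.any (fun e => decide (e ∈ p)))

-- A's inner two loops select exactly the demands that are fully cut
theorem kgA_eq (g_list : List Int) (demands : List (Int × List (List Int))) :
    ((PySem.List.enumerate demands 0).foldl (fun kg kdem =>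
      let dem := kdem.2
      let cuts : Int := (PySem.List.enumerate dem.2 0).foldl (fun cuts pp =>
        if g_list.any (fun e_id => decide (e_id ∈ pp.2)) then cuts + 1 else cuts) 0
      if cuts = (dem.2.length : Int) then kg ++ [kdem.1] else kg) []) =
    ((PySem.List.enumerate demands 0).filter (fun kd => fullyCut g_list kd.2.2)).map (·.1) := by
  rw [PySem.List.foldl_congr_mem _ _
      (fun (kg : List Int) (kdem : Int × Int × List (List Int)) =>
        if fullyCut g_list kdem.2.2 then kg ++ [kdem.1] else kg) _ ?_]
  · simpa using PySem.List.foldl_append_if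
      (fun kd : Int × Int × List (List Int) => fullyCut g_list kd.2.2)
      (fun kd => kd.1) (PySem.List.enumerate demands 0) []
  · intro kg kdem _
    simp only []
    rw [PySem.List.foldl_ite_add_one
        (fun pp : Int × List Int => g_list.any (fun e_id => decide (e_id ∈ pp.2)) = true)]
    have hcnt : List.countP
        (fun pp : Int × List Int => decide (g_list.any (fun e_id => decide (e_id ∈ pp.2)) = true))
        (PySem.List.enumerate kdem.2.2 0)
        = List.countP (fun p => g_list.any (fun e => decide (e ∈ p))) kdem.2.2 := by
      conv_rhs => rw [← PySem.List.map_snd_enumerate kdem.2.2 0, List.countP_map]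
      refine List.countP_congr ?_
      intro pp _
      simp [Function.comp]
    rw [hcnt]
    have hiff : (0 + (List.countP (fun p => g_list.any (fun e => decide (e ∈ p))) kdem.2.2 : Int)
        = (kdem.2.2.length : Int)) ↔ fullyCut g_list kdem.2.2 = true := by
      rw [zero_add, Int.natCast_inj, List.countP_eq_length]
      simp [fullyCut]
    exact if_congr hiff rfl rfl

-- the flattened triple list (edge, (demand id, path id)) the index is built from
def bTriples (demands : List (Int × List (List Int))) : List (Int × Int × Int) :=
  (PySem.List.enumerate demands 0).flatMap (fun kd =>
    (PySem.List.enumerate kd.2.2 0).flatMap (fun pp =>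
      pp.2.map (fun e => (e, kd.1, pp.1))))

theorem foldl_flatMap {α β γ : Type} (l : List α) (f : α → List β) (g : γ → β → γ) (a : γ) :
    (l.flatMap f).foldl g a = l.foldl (fun a x => (f x).foldl g a) a := by
  induction l generalizing a with
  | nil => rfl
  | cons x t ih => simp [List.flatMap_cons, List.foldl_append, ih]

theorem bIndex_eq_flat (demands : List (Int × List (List Int))) :
    bIndex demands = (bTriples demands).foldl
      (fun d t => d.modify t.1 [] (· ++ [t.2])) PySem.Dict.empty := by
  unfold bIndex bTriples
  rw [foldl_flatMap]
  have h1 : (fun (d : PySem.Dict Int (List (Int × Int))) (kd : Int × Int × List (List Int)) =>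
      ((PySem.List.enumerate kd.2.2 0).flatMap (fun pp => pp.2.map (fun e => (e, kd.1, pp.1)))).foldl
        (fun d t => d.modify t.1 [] (· ++ [t.2])) d)
      = (fun d kd => (PySem.List.enumerate kd.2.2 0).foldl (fun d pp =>
          pp.2.foldl (fun d e => d.modify e [] (· ++ [(kd.1, pp.1)])) d) d) := by
    funext d kd
    rw [foldl_flatMap]
    have h2 : (fun (d : PySem.Dict Int (List (Int × Int))) (pp : Int × List Int) =>
        (pp.2.map (fun e => (e, kd.1, pp.1))).foldl (fun d t => d.modify t.1 [] (· ++ [t.2])) d)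
        = (fun d pp => pp.2.foldl (fun d e => d.modify e [] (· ++ [(kd.1, pp.1)])) d) := by
      funext d pp
      rw [List.foldl_map]
    rw [h2]
  rw [h1]

theorem mem_bIndex_getD (demands : List (Int × List (List Int))) (e : Int) (pr : Int × Int) :
    pr ∈ (bIndex demands).getD e [] ↔ (e, pr) ∈ bTriples demands := by
  rw [bIndex_eq_flat, PySem.Dict.getD_foldl_modify_append, PySem.Dict.getD_empty]
  simp only [List.nil_append, List.mem_map, List.mem_filter]
  constructor
  · rintro ⟨t, ⟨ht, he⟩, rfl⟩
    obtain ⟨t1, t2⟩ := t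
    simp only [beq_iff_eq] at he
    simpa [he] using ht
  · intro h
    exact ⟨(e, pr), ⟨h, by simp⟩, rfl⟩

theorem mem_bTriples (demands : List (Int × List (List Int))) (e : Int) (pr : Int × Int) :
    (e, pr) ∈ bTriples demands ↔
      ∃ (k : Nat) (hk : k < demands.length) (p : Nat) (hp : p < demands[k].2.length),
        pr = ((k : Int), (p : Int)) ∧ e ∈ demands[k].2[p] := by
  unfold bTriples
  simp only [List.mem_flatMap, List.mem_map, PySem.List.mem_enumerate_iff]
  constructor
  · rintro ⟨kd, ⟨k, hk, rfl⟩, pp, ⟨p, hp, rfl⟩, e', he', heq⟩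
    injection heq with h1 h2
    subst h1; subst h2
    exact ⟨k, hk, p, hp, by simp, by simpa using he'⟩
  · rintro ⟨k, hk, p, hp, rfl, he⟩
    exact ⟨(0 + (k:Int), demands[k]), ⟨k, hk, rfl⟩,
      (0 + (p:Int), demands[k].2[p]), ⟨p, hp, rfl⟩, e, he, by simp⟩

-- the hit set: membership and nodup
theorem mem_hit (g_list : List Int) (f : Int → List (Int × Int)) (s : List (Int × Int)) (x : Int × Int) :
    x ∈ g_list.foldl (fun h e => PySem.Set.update h (f e)) s ↔ x ∈ s ∨ ∃ e ∈ g_list, x ∈ f e := by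
  induction g_list generalizing s with
  | nil => simp
  | cons e t ih =>
    rw [List.foldl_cons, ih]
    simp only [PySem.Set.mem_update, List.mem_cons]
    constructor
    · rintro ((h | h) | ⟨e', he', hx⟩)
      · exact Or.inl h
      · exact Or.inr ⟨e, Or.inl rfl, h⟩
      · exact Or.inr ⟨e', Or.inr he', hx⟩
    · rintro (h | ⟨e', (rfl | he'), hx⟩)
      · exact Or.inl (Or.inl h)
      · exact Or.inl (Or.inr hx)
      · exact Or.inr ⟨e', he', hx⟩

theorem nodup_hit (g_list : List Int) (f : Int → List (Int × Int)) (s : List (Int × Int)) (hs : s.Nodup) :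
    (g_list.foldl (fun h e => PySem.Set.update h (f e)) s).Nodup := by
  induction g_list generalizing s with
  | nil => exact hs
  | cons e t ih => exact ih _ (PySem.Set.nodup_update _ _ hs)

-- the counting loop: entry k of the result counts the pairs with first component k
theorem cnt_getD (h : List (Int × Int)) (c : List Int) (k : Nat) (hk : k < c.length)
    (hh : ∀ p ∈ h, ∃ j : Nat, j < c.length ∧ p.1 = (j : Int)) :
    PySem.List.pyGetD (h.foldl (fun c p => PySem.List.pySetD c p.1 (PySem.List.pyGetD c p.1 0 + 1)) c) (k : Int) 0
      = PySem.List.pyGetD c (k : Int) 0 + (h.countP (fun p => p.1 == (k : Int)) : Int) := by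
  induction h generalizing c with
  | nil => simp
  | cons p t ih =>
    obtain ⟨j, hj, hpj⟩ := hh p (List.mem_cons_self ..)
    rw [List.foldl_cons, List.countP_cons]
    have hlen : (PySem.List.pySetD c p.1 (PySem.List.pyGetD c p.1 0 + 1)).length = c.length := by
      rw [hpj, PySem.List.pySetD_natCast]; simp
    rw [ih _ (hlen ▸ hk) (fun q hq => by
      obtain ⟨j', hj', hq'⟩ := hh q (List.mem_cons_of_mem _ hq)
      exact ⟨j', hlen ▸ hj', hq'⟩)]
    simp only [hpj, PySem.List.pySetD_natCast, PySem.List.pyGetD_natCast]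
    by_cases hkj : k = j
    · subst hkj
      rw [List.getD_eq_getElem _ _ (by simpa using hk), List.getElem_set_self]
      simp only [List.getD_eq_getElem _ _ hk, beq_self_eq_true, if_true]
      omega
    · have hne : (((j:Int)) == ((k:Int))) = false := by
        simp only [beq_eq_false_iff_ne, ne_eq, Int.natCast_inj]
        omega
      rw [List.getD_eq_getElem _ _ (by simpa using hk), List.getD_eq_getElem _ _ hk,
          List.getElem_set_ne (by omega)]
      simp only [hne, Bool.false_eq_true, if_false]
      omega

-- per scenario, per demand: B's count reaches the path count iff the demand is fully cut
theorem row_eq (demands : List (Int × List (List Int))) (g_list : List Int) :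
    bRowOf (bIndex demands) (demands.map (fun d => (d.2.length : Int))) demands.length g_list
      = ((PySem.List.enumerate demands 0).filter (fun kd => fullyCut g_list kd.2.2)).map (·.1) := by
  unfold bRowOf
  simp only []
  set hit := g_list.foldl (fun h e => PySem.Set.update h ((bIndex demands).getD e [])) PySem.Set.empty with hhit
  have hmem : ∀ x : Int × Int, x ∈ hit ↔
      ∃ (k : Nat) (hk : k < demands.length) (p : Nat) (hp : p < demands[k].2.length),
        x = ((k : Int), (p : Int)) ∧ ∃ e ∈ g_list, e ∈ demands[k].2[p] := by
    intro x
    rw [hhit, mem_hit]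
    simp only [PySem.Set.empty]
    constructor
    · rintro (h | ⟨e, he, hx⟩)
      · simp at h
      · obtain ⟨k, hk, p, hp, rfl, hep⟩ := (mem_bTriples demands e x).mp ((mem_bIndex_getD demands e x).mp hx)
        exact ⟨k, hk, p, hp, rfl, e, he, hep⟩
    · rintro ⟨k, hk, p, hp, rfl, e, he, hep⟩
      exact Or.inr ⟨e, he, (mem_bIndex_getD demands e _).mpr
        ((mem_bTriples demands e _).mpr ⟨k, hk, p, hp, rfl, hep⟩)⟩
  have hnd : hit.Nodup := nodup_hit _ _ _ (by simp [PySem.Set.empty])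
  have hrange : ∀ p ∈ hit, ∃ j : Nat, j < (List.replicate demands.length (0:Int)).length ∧ p.1 = (j : Int) := by
    intro p hp
    obtain ⟨k, hk, _, _, rfl, _⟩ := (hmem p).mp hp
    exact ⟨k, by simpa using hk, rfl⟩
  -- rewrite A's side as a filter over pyRange
  have hA : ((PySem.List.enumerate demands 0).filter (fun kd => fullyCut g_list kd.2.2)).map (·.1)
      = (PySem.List.pyRange 0 (demands.length : Int) 1).filter
          (fun j => fullyCut g_list (PySem.List.pyGetD demands j ((0:Int), [])).2) := by
    rw [PySem.List.enumerate_eq_map_pyRange demands ((0:Int), []), List.filter_map, List.map_map]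
    simp [Function.comp_def]
  rw [hA]
  refine List.filter_congr ?_
  intro j hj
  obtain ⟨k, hk, rfl⟩ : ∃ k : Nat, k < demands.length ∧ j = (k : Int) := by
    have := (PySem.List.mem_pyRange_one ..).mp hj
    exact ⟨j.toNat, by omega, by omega⟩
  rw [cnt_getD hit _ k (by simpa using hk) hrange]
  rw [PySem.List.pyGetD_natCast, PySem.List.pyGetD_natCast, PySem.List.pyGetD_natCast]
  rw [List.getD_eq_getElem _ _ (by simpa using hk), List.getD_eq_getElem _ _ (by simpa using hk),
      List.getD_eq_getElem _ _ (by simpa using hk)]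
  simp only [List.getElem_replicate, List.getElem_map, zero_add]
  -- count the distinct hit paths of demand k
  have hcount : hit.countP (fun p => p.1 == (k : Int))
      = List.countP (fun p => g_list.any (fun e => decide (e ∈ p))) demands[k].2 := by
    set paths := demands[k].2 with hpaths
    set lB := (hit.filter (fun p => p.1 == (k : Int))).map (·.2) with hlB
    set lA := ((PySem.List.enumerate paths 0).filter
        (fun pp => g_list.any (fun e => decide (e ∈ pp.2)))).map (·.1) with hlA
    have hndB : lB.Nodup := by
      refine (List.Nodup.filter _ hnd).map_on ?_
      intro p hp q hq hpq
      have hp1 := (List.mem_filter.mp hp).2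
      have hq1 := (List.mem_filter.mp hq).2
      rw [beq_iff_eq] at hp1 hq1
      exact Prod.ext (hp1.trans hq1.symm) hpq
    have hndA : lA.Nodup := by
      have hsub : lA.Sublist ((PySem.List.enumerate paths 0).map (·.1)) :=
        List.Sublist.map _ List.filter_sublist
      refine hsub.nodup ?_
      rw [PySem.List.map_fst_enumerate]
      exact PySem.List.nodup_pyRange_one _ _
    have hmm : ∀ x, x ∈ lA ↔ x ∈ lB := by
      intro x
      rw [hlA, hlB]
      simp only [List.mem_map, List.mem_filter, PySem.List.mem_enumerate_iff]
      constructor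
      · rintro ⟨pp, ⟨⟨p, hp, rfl⟩, hcond⟩, rfl⟩
        obtain ⟨e, he, hep⟩ := List.any_eq_true.mp hcond
        refine ⟨((k : Int), (p : Int)), ⟨(hmem _).mpr ⟨k, hk, p, hp, rfl, e, he, of_decide_eq_true hep⟩, by simp⟩, by simp⟩
      · rintro ⟨pr, ⟨hpr, hprk⟩, rfl⟩
        obtain ⟨k', hk', p, hp, rfl, e, he, hep⟩ := (hmem pr).mp hpr
        simp only [beq_iff_eq, Int.natCast_inj] at hprk
        subst hprk
        exact ⟨(0 + (p : Int), paths[p]), ⟨⟨p, hp, rfl⟩,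
          List.any_eq_true.mpr ⟨e, he, decide_eq_true hep⟩⟩, by simp⟩
    have hperm : lA.Perm lB := (List.perm_ext_iff_of_nodup hndA hndB).mpr hmm
    have h1 : hit.countP (fun p => p.1 == (k : Int)) = lB.length := by
      rw [hlB, List.length_map, List.countP_eq_length_filter]
    have h2 : lA.length = List.countP (fun p => g_list.any (fun e => decide (e ∈ p))) paths := by
      rw [hlA, List.length_map, ← List.countP_eq_length_filter]
      conv_rhs => rw [← PySem.List.map_snd_enumerate paths 0, List.countP_map]
      simp [Function.comp_def]
    rw [h1, ← hperm.length_eq, h2]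
  rw [hcount]
  rw [Bool.eq_iff_iff, beq_iff_eq, Int.natCast_inj, List.countP_eq_length]
  simp [fullyCut, List.all_eq_true]

theorem compute_ks_spec_core (scenarios : List (List Int)) (demands : List (Int × List (List Int))) :
    compute_ks scenarios demands = compute_ks_alt scenarios demands := by
  unfold compute_ks compute_ks_alt
  simp only []
  rw [PySem.List.foldl_append_singleton_eq_map
      (fun g_list => bRowOf (bIndex demands) (demands.map (fun d => (d.2.length : Int))) demands.length g_list) scenarios []]
  rw [PySem.List.foldl_append_singleton_eq_map
      (fun g_list => (PySem.List.enumerate demands 0).foldl (fun kg kdem =>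
        let dem := kdem.2
        let cuts : Int := (PySem.List.enumerate dem.2 0).foldl (fun cuts pp =>
          if g_list.any (fun e_id => decide (e_id ∈ pp.2)) then cuts + 1 else cuts) 0
        if cuts = (dem.2.length : Int) then kg ++ [kdem.1] else kg) []) scenarios []]
  simp only [List.nil_append]
  refine List.map_congr_left (fun g_list _ => ?_)
  rw [kgA_eq, row_eq]

-- ===== VERDICT (by name: the statement is the Claim_ definition above) =====
theorem compute_ks_spec : Claim_equal_compute_ks := by
  intro scenarios demands _
  exact (compute_ks_spec_core scenarios demands)
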